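-- pv_equiv track=rewrite | github.com/linkki/aoc2021 | 10/solution.py | calculate_closing_score
-- ===== SOURCE A (Python) =====
-- def calculate_closing_score(charlist: list):
--     score = 0
--     for c in reversed(charlist):
--         score *= 5
--         if c == '(':
--             score += 1
--         elif c == '[':
--             score += 2
--         elif c == '{':
--             score += 3
--         elif c == '<':
--             score += 4
--     return score
-- ===== SOURCE B (Python) =====
-- def calculate_closing_score(charlist: list):
--     vals = {'(': 1, '[': 2, '{': 3, '<': 4}
--     score = 0
--     weight = 1
--     for c in charlist:
--         score += vals.get(c, 0) * weight
--         weight *= 5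
--     return score
-- ===== Notes on version B (the rewrite author's own statement) =====
-- stated objective: alternative
-- what changed: Forward pass with an explicit place-value multiplier and a value table, instead of A's reversed-order Horner accumulation with an if/elif chain.
import Mathlib
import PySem

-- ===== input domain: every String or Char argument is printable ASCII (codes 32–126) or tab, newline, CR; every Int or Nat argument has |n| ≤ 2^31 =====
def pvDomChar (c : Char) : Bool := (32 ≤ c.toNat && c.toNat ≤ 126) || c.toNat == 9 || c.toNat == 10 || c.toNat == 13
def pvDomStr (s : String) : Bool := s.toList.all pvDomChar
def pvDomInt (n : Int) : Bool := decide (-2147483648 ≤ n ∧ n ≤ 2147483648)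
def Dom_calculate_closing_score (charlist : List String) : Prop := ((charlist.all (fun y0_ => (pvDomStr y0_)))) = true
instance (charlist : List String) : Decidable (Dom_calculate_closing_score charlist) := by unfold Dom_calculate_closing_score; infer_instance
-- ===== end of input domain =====

-- B replaces A's reversed-order Horner accumulation by a forward pass with an explicit place-value weight (alternative decomposition, same cost).
-- ===== PORT A =====
def calculate_closing_score (charlist : List String) : Int :=
  charlist.reverse.foldl (fun score c =>
    let score := score * 5
    if c = "(" then score + 1
    else if c = "[" then score + 2
    else if c = "{" then score + 3
    else if c = "<" then score + 4
    else score) 0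

-- ===== PORT B =====
def pvVals : PySem.Dict String Int :=
  (((PySem.Dict.empty.insert "(" 1).insert "[" 2).insert "{" 3).insert "<" 4

def calculate_closing_score_alt (charlist : List String) : Int :=
  (charlist.foldl (fun (p : Int × Int) c => (p.1 + (pvVals.getD c 0) * p.2, p.2 * 5)) (0, 1)).1

-- ===== PRECONDITION & SPEC =====
def Spec_calculate_closing_score (charlist : List String) (out : Int) : Prop := out = calculate_closing_score_alt charlist
instance (charlist : List String) (out : Int) : Decidable (Spec_calculate_closing_score charlist out) := by unfold Spec_calculate_closing_score; infer_instance

-- ===== CLAIM (what is proved, stated in full; the proofs are below) =====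
def Claim_equal_calculate_closing_score : Prop := ∀ (charlist : List String), Dom_calculate_closing_score charlist → Spec_calculate_closing_score charlist (calculate_closing_score charlist)

-- ===== LEMMAS AND PROOFS =====

-- ===== VERDICT (by name: the statement is the Claim_ definition above) =====
def pvVal (c : String) : Int :=
  if c = "(" then 1 else if c = "[" then 2 else if c = "{" then 3 else if c = "<" then 4 else 0

theorem valsGetD (c : String) : pvVals.getD c 0 = pvVal c := by
  by_cases h1 : "(" = c
  · subst h1; decide
  by_cases h2 : "[" = c
  · subst h2; decide
  by_cases h3 : "{" = c
  · subst h3; decide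
  by_cases h4 : "<" = c
  · subst h4; decide
  have e1 : ("(" == c) = false := beq_eq_false_iff_ne.mpr h1
  have e2 : ("[" == c) = false := beq_eq_false_iff_ne.mpr h2
  have e3 : ("{" == c) = false := beq_eq_false_iff_ne.mpr h3
  have e4 : ("<" == c) = false := beq_eq_false_iff_ne.mpr h4
  have f1 : ¬ c = "(" := fun h => h1 h.symm
  have f2 : ¬ c = "[" := fun h => h2 h.symm
  have f3 : ¬ c = "{" := fun h => h3 h.symm
  have f4 : ¬ c = "<" := fun h => h4 h.symm
  simp [pvVals, pvVal, PySem.Dict.getD, PySem.Dict.get?, PySem.Dict.insert, PySem.Dict.empty,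
    List.find?, e1, e2, e3, e4, f1, f2, f3, f4]

theorem a_cons (c : String) (t : List String) :
    calculate_closing_score (c :: t) = calculate_closing_score t * 5 + pvVal c := by
  simp only [calculate_closing_score, List.reverse_cons, List.foldl_append, List.foldl_cons,
    List.foldl_nil, pvVal]
  split_ifs <;> ring

theorem b_inv (l : List String) (s w : Int) :
    (l.foldl (fun (p : Int × Int) c => (p.1 + (pvVals.getD c 0) * p.2, p.2 * 5)) (s, w)).1
      = s + w * calculate_closing_score l := by
  induction l generalizing s w with
  | nil => simp [calculate_closing_score]
  | cons c t ih =>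
    simp only [List.foldl_cons]
    rw [ih, a_cons, valsGetD]
    ring

theorem calculate_closing_score_spec : Claim_equal_calculate_closing_score := by
  intro l _
  unfold Spec_calculate_closing_score calculate_closing_score_alt
  rw [b_inv]
  ring
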